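-- pv_equiv track=rewrite | github.com/3582730951/vmprotect | core/wrapper/weaver_proxy.py | _extract_target_triple
-- ===== SOURCE A (Python) =====
-- from typing import Dict, List, Mapping, Optional, Sequence
--
-- def _extract_target_triple(args: Sequence[str]) -> Optional[str]:
--     i = 0
--     while i < len(args):
--         token = args[i]
--         if token in {"-target", "--target"} and i + 1 < len(args):
--             return args[i + 1]
--         if token.startswith("--target="):
--             return token.split("=", 1)[1]
--         if token.startswith("-target="):
--             return token.split("=", 1)[1]
--         i += 1
--     return None
-- ===== SOURCE B (Python) =====
-- def _extract_target_triple(args):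
--     # Staged: find the position of the first bare flag (with a following value)
--     # and of the first inline '=' form independently, then use the earlier one.
--     args = list(args)
--     n = len(args)
--     bare = [i for i, t in enumerate(args)
--             if t in ("-target", "--target") and i + 1 < n]
--     inline = [i for i, t in enumerate(args)
--               if t.startswith(("--target=", "-target="))]
--     if not bare and not inline:
--         return None
--     best = min(bare + inline)
--     if bare and bare[0] == best:
--         return args[best + 1]
--     return args[best].split("=", 1)[1]
-- ===== Notes on version B (the rewrite author's own statement) =====
-- stated objective: alternative
-- what changed: Replaces A's single early-return scan with i+1 look-ahead by a staged search: two comprehensions independently collect the positions of bare -target/--target flags (with a follower) and of inline --target=/-target= tokens, then the overall minimum position decides which form wins and how the value is extracted.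
import Mathlib
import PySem

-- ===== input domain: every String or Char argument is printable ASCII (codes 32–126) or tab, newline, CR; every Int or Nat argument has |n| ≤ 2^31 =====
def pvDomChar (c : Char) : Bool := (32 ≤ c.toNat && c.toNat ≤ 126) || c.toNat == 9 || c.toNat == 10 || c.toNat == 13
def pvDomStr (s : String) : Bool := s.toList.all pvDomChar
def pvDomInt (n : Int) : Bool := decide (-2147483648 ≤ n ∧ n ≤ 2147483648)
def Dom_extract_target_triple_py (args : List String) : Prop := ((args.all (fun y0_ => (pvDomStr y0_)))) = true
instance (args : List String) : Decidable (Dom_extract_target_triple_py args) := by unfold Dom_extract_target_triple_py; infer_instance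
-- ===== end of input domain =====

-- B replaces A's early-return scan with i+1 look-ahead by a staged search: collect the positions
-- of bare flags and of inline '=' tokens in two independent passes, then the minimum position
-- decides which form wins (objective: alternative decomposition; same cost).

-- ===== PORT A =====
-- A's while loop over index i; args[i]/args[i+1] are only read under an in-range guard, ported as getD
def extract_target_triple_py_loop (args : List String) (i : Nat) : Option String :=
  if i < args.length then
    let token := args.getD i ""
    if (token == "-target" || token == "--target") && i + 1 < args.length then
      some (args.getD (i + 1) "")
    else if PySem.Str.startswith token "--target=" then
      some (((PySem.Str.splitMax? token "=" 1).getD []).getD 1 "")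
    else if PySem.Str.startswith token "-target=" then
      some (((PySem.Str.splitMax? token "=" 1).getD []).getD 1 "")
    else extract_target_triple_py_loop args (i + 1)
  else none
termination_by args.length - i

def extract_target_triple_py (args : List String) : Option String :=
  extract_target_triple_py_loop args 0

-- ===== PORT B =====
-- [i for i, t in enumerate(args) if t in ("-target","--target") and i + 1 < n]
-- (the comprehension, transliterated as a recursion carrying the running index i and n = len(args))
def alt_bare_aux (xs : List String) (i : Int) (n : Int) : List Int :=
  match xs with
  | [] => []
  | t :: rest =>
    (if (t == "-target" || t == "--target") && decide (i + 1 < n) then [i] else []) ++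
      alt_bare_aux rest (i + 1) n

def alt_bare (args : List String) : List Int := alt_bare_aux args 0 (args.length : Int)

-- [i for i, t in enumerate(args) if t.startswith(("--target=", "-target="))]
def alt_inline_aux (xs : List String) (i : Int) : List Int :=
  match xs with
  | [] => []
  | t :: rest =>
    (if PySem.Str.startswith t "--target=" || PySem.Str.startswith t "-target=" then [i] else []) ++
      alt_inline_aux rest (i + 1)

def alt_inline (args : List String) : List Int := alt_inline_aux args 0

def extract_target_triple_py_alt (args : List String) : Option String :=
  let bare := alt_bare args
  let inline := alt_inline args
  if bare.isEmpty && inline.isEmpty then none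
  else
    match PySem.List.min? (bare ++ inline) (fun x => x) with
    | none => none  -- unreachable: the list is nonempty here
    | some best =>
      if !bare.isEmpty && bare.headD 0 == best then
        -- indices in bare satisfy i + 1 < len args by construction, so args[best+1] is in range
        some (PySem.List.pyGetD args (best + 1) "")
      else
        some (((PySem.Str.splitMax? (PySem.List.pyGetD args best "") "=" 1).getD []).getD 1 "")

-- ===== PRECONDITION & SPEC =====
def Spec_extract_target_triple_py (args : List String) (out : Option String) : Prop := out = extract_target_triple_py_alt args
instance (args : List String) (out : Option String) : Decidable (Spec_extract_target_triple_py args out) := by unfold Spec_extract_target_triple_py; infer_instance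

-- ===== CLAIM (what is proved, stated in full; the proofs are below) =====
def Claim_equal_extract_target_triple_py : Prop := ∀ (args : List String), Dom_extract_target_triple_py args → Spec_extract_target_triple_py args (extract_target_triple_py args)

-- ===== LEMMAS AND PROOFS =====

-- reference scan: look-back single pass with an 'expecting' flag; both ports are proved equal to it
def refScan (args : List String) (expecting : Bool) : Option String :=
  match args with
  | [] => none
  | token :: rest =>
    if expecting then some token
    else if token == "-target" || token == "--target" then refScan rest true
    else if PySem.Str.startswith token "--target=" || PySem.Str.startswith token "-target=" then
      some (((PySem.Str.splitMax? token "=" 1).getD []).getD 1 "")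
    else refScan rest false

theorem drop_cons_getD (args : List String) (i : Nat) (h : i < args.length) :
    args.drop i = args.getD i "" :: args.drop (i + 1) := by
  rw [List.drop_eq_getElem_cons h, List.getD_eq_getElem?_getD, List.getElem?_eq_getElem h]
  simp

theorem refScan_nil (e : Bool) : refScan [] e = none := rfl
theorem refScan_cons_true (x : String) (r : List String) : refScan (x :: r) true = some x := rfl

theorem not_target_of_sw {t : String}
    (h : PySem.Str.startswith t "--target=" = true ∨ PySem.Str.startswith t "-target=" = true) :
    ¬ (t = "-target" ∨ t = "--target") := by
  rintro (rfl | rfl) <;> revert h <;> decide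

theorem loops_agree (args : List String) (i : Nat) :
    extract_target_triple_py_loop args i = refScan (args.drop i) false := by
  induction i using extract_target_triple_py_loop.induct (args := args) with
  | case1 i hlt token htok =>
      have hand := htok
      rw [Bool.and_eq_true] at hand
      obtain ⟨hor, hn⟩ := hand
      have hn' : i + 1 < args.length := of_decide_eq_true hn
      have hor1 : args[i] = "-target" ∨ args[i] = "--target" := by
        have h : ((args.getD i "" == "-target" || args.getD i "" == "--target") = true) := hor
        rw [List.getD_eq_getElem?_getD, List.getElem?_eq_getElem hlt, Option.getD_some] at h
        simpa using h
      rw [extract_target_triple_py_loop, drop_cons_getD args i hlt]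
      conv_rhs => rw [refScan]
      simp only [hlt, if_true, List.getD_eq_getElem?_getD, List.getElem?_eq_getElem hlt,
        List.getElem?_eq_getElem hn', Option.getD_some, Bool.false_eq_true, if_false]
      rw [if_pos (by rcases hor1 with h | h <;> simp [h, hn']),
        if_pos (by rcases hor1 with h | h <;> simp [h]),
        List.drop_eq_getElem_cons hn', refScan_cons_true]
  | case2 i hlt token htok hsw =>
      have hor1 : ¬ (args[i] = "-target" ∨ args[i] = "--target") := by
        have := not_target_of_sw (t := args.getD i "") (Or.inl hsw)
        simpa [List.getD_eq_getElem?_getD, List.getElem?_eq_getElem hlt] using this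
      have hsw1 : PySem.Str.startswith args[i] "--target=" = true := by
        have : PySem.Str.startswith (args.getD i "") "--target=" = true := hsw
        rwa [List.getD_eq_getElem?_getD, List.getElem?_eq_getElem hlt, Option.getD_some] at this
      rw [extract_target_triple_py_loop, drop_cons_getD args i hlt]
      conv_rhs => rw [refScan]
      simp only [hlt, if_true, List.getD_eq_getElem?_getD, List.getElem?_eq_getElem hlt,
        Option.getD_some, Bool.false_eq_true, if_false]
      rw [if_neg (by simp [hor1]), if_pos hsw1, if_neg (by simpa using hor1),
        if_pos (Bool.or_eq_true_iff.mpr (Or.inl hsw1))]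
  | case3 i hlt token htok hsw1 hsw2 =>
      have hor1 : ¬ (args[i] = "-target" ∨ args[i] = "--target") := by
        have := not_target_of_sw (t := args.getD i "") (Or.inr hsw2)
        simpa [List.getD_eq_getElem?_getD, List.getElem?_eq_getElem hlt] using this
      have hsw1' : ¬ PySem.Str.startswith args[i] "--target=" = true := by
        have : ¬ PySem.Str.startswith (args.getD i "") "--target=" = true := hsw1
        rwa [List.getD_eq_getElem?_getD, List.getElem?_eq_getElem hlt, Option.getD_some] at this
      have hsw2' : PySem.Str.startswith args[i] "-target=" = true := by
        have : PySem.Str.startswith (args.getD i "") "-target=" = true := hsw2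
        rwa [List.getD_eq_getElem?_getD, List.getElem?_eq_getElem hlt, Option.getD_some] at this
      rw [extract_target_triple_py_loop, drop_cons_getD args i hlt]
      conv_rhs => rw [refScan]
      simp only [hlt, if_true, List.getD_eq_getElem?_getD, List.getElem?_eq_getElem hlt,
        Option.getD_some, Bool.false_eq_true, if_false]
      rw [if_neg (by simp [hor1]), if_neg hsw1', if_pos hsw2', if_neg (by simpa using hor1),
        if_pos (Bool.or_eq_true_iff.mpr (Or.inr hsw2'))]
  | case4 i hlt token htok hsw1 hsw2 ih =>
      have hsw1' : ¬ PySem.Str.startswith args[i] "--target=" = true := by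
        have : ¬ PySem.Str.startswith (args.getD i "") "--target=" = true := hsw1
        rwa [List.getD_eq_getElem?_getD, List.getElem?_eq_getElem hlt, Option.getD_some] at this
      have hsw2' : ¬ PySem.Str.startswith args[i] "-target=" = true := by
        have : ¬ PySem.Str.startswith (args.getD i "") "-target=" = true := hsw2
        rwa [List.getD_eq_getElem?_getD, List.getElem?_eq_getElem hlt, Option.getD_some] at this
      rw [extract_target_triple_py_loop, drop_cons_getD args i hlt]
      conv_rhs => rw [refScan]
      simp only [hlt, if_true, List.getD_eq_getElem?_getD, List.getElem?_eq_getElem hlt,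
        Option.getD_some, Bool.false_eq_true, if_false]
      by_cases hor : args[i] = "-target" ∨ args[i] = "--target"
      · have hn : ¬ i + 1 < args.length := by
          intro h
          apply htok
          rw [Bool.and_eq_true]
          refine ⟨?_, decide_eq_true h⟩
          show ((args.getD i "" == "-target" || args.getD i "" == "--target") = true)
          rw [List.getD_eq_getElem?_getD, List.getElem?_eq_getElem hlt, Option.getD_some]
          rcases hor with h' | h' <;> simp [h']
        have hdn : args.drop (i + 1) = [] := List.drop_eq_nil_of_le (by omega)
        rw [if_neg (by simp [hn]), if_neg hsw1', if_neg hsw2', if_pos (by simpa using hor),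
          ih, hdn, refScan_nil, refScan_nil]
      · rw [if_neg (by simp [hor]), if_neg hsw1', if_neg hsw2', if_neg (by simpa using hor),
          if_neg (fun h => (Bool.or_eq_true_iff.mp h).elim (fun h1 => hsw1' h1) (fun h2 => hsw2' h2)), ih]
  | case5 i hge =>
      rw [extract_target_triple_py_loop]
      rw [if_neg hge, List.drop_eq_nil_of_le (Nat.le_of_not_lt hge), refScan]

-- ---------- B = refScan ----------

theorem alt_bare_aux_shift (xs : List String) (i m : Int) :
    alt_bare_aux xs (i + 1) (m + 1) = (alt_bare_aux xs i m).map (fun x => x + 1) := by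
  induction xs generalizing i with
  | nil => rfl
  | cons t rest ih =>
    simp only [alt_bare_aux, List.map_append]
    congr 1
    · have : decide (i + 1 + 1 < m + 1) = decide (i + 1 < m) := by
        by_cases h : i + 1 < m
        · rw [decide_eq_true (by omega : i + 1 + 1 < m + 1), decide_eq_true h]
        · rw [decide_eq_false (by omega : ¬ i + 1 + 1 < m + 1), decide_eq_false h]
      rw [this]
      split_ifs <;> simp
    · exact ih (i + 1)

theorem alt_inline_aux_shift (xs : List String) (i : Int) :
    alt_inline_aux xs (i + 1) = (alt_inline_aux xs i).map (fun x => x + 1) := by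
  induction xs generalizing i with
  | nil => rfl
  | cons t rest ih =>
    simp only [alt_inline_aux, List.map_append]
    congr 1
    · split_ifs <;> simp
    · exact ih (i + 1)

theorem alt_bare_cons (t : String) (rest : List String) :
    alt_bare (t :: rest) =
      (if (t == "-target" || t == "--target") && !rest.isEmpty then [(0 : Int)] else []) ++
        (alt_bare rest).map (fun x => x + 1) := by
  have hlen : (((t :: rest).length : Nat) : Int) = (rest.length : Int) + 1 := by
    rw [List.length_cons]; push_cast; ring
  rw [alt_bare, alt_bare_aux, hlen]
  congr 1
  · have hD : decide ((0 : Int) + 1 < (rest.length : Int) + 1) = !rest.isEmpty := by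
      rcases rest with _ | ⟨r, rs⟩
      · simp
      · simp only [List.isEmpty_cons, Bool.not_false, List.length_cons]
        rw [decide_eq_true_iff]
        push_cast
        omega
    rw [hD]
  · rw [alt_bare]
    exact alt_bare_aux_shift rest 0 (rest.length : Int)

theorem alt_inline_cons (t : String) (rest : List String) :
    alt_inline (t :: rest) =
      (if PySem.Str.startswith t "--target=" || PySem.Str.startswith t "-target=" then [(0 : Int)] else []) ++
        (alt_inline rest).map (fun x => x + 1) := by
  rw [alt_inline, alt_inline_aux]
  congr 1
  rw [alt_inline]
  exact alt_inline_aux_shift rest 0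

theorem mem_alt_nonneg (args : List String) :
    (∀ x ∈ alt_bare args, 0 ≤ x) ∧ (∀ x ∈ alt_inline args, 0 ≤ x) := by
  induction args with
  | nil =>
    constructor <;> intro x hx <;>
      simp [alt_bare, alt_bare_aux, alt_inline, alt_inline_aux] at hx
  | cons t rest ih =>
    obtain ⟨ihb, ihi⟩ := ih
    constructor
    · intro x hx
      rw [alt_bare_cons] at hx
      rcases List.mem_append.mp hx with h | h
      · rcases hc : ((t == "-target" || t == "--target") && !rest.isEmpty) with _ | _
        · rw [hc] at h; simp at h
        · rw [hc] at h
          simp at h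
          omega
      · obtain ⟨y, hy, rfl⟩ := List.mem_map.mp h
        have := ihb y hy; omega
    · intro x hx
      rw [alt_inline_cons] at hx
      rcases List.mem_append.mp hx with h | h
      · rcases hc : (PySem.Str.startswith t "--target=" || PySem.Str.startswith t "-target=") with _ | _
        · rw [hc] at h; simp at h
        · rw [hc] at h
          simp at h
          omega
      · obtain ⟨y, hy, rfl⟩ := List.mem_map.mp h
        have := ihi y hy; omega

theorem min?_zero (l : List Int) (h0 : (0 : Int) ∈ l) (hnn : ∀ y ∈ l, 0 ≤ y) :
    PySem.List.min? l (fun x => x) = some 0 := by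
  obtain ⟨m, hm⟩ : ∃ m, PySem.List.min? l (fun x => x) = some m := by
    rcases hv : PySem.List.min? l (fun x => x) with _ | m
    · rw [PySem.List.min?_eq_none_iff] at hv
      subst hv; simp at h0
    · exact ⟨m, rfl⟩
  have h1 : 0 ≤ m := hnn m (PySem.List.min?_mem hm)
  have h2 : m ≤ 0 := PySem.List.min?_isMin hm 0 h0
  have : m = 0 := by omega
  rw [hm, this]

theorem min?_shift (l : List Int) :
    PySem.List.min? (l.map (fun x => x + 1)) (fun x => x) =
      (PySem.List.min? l (fun x => x)).map (fun x => x + 1) := by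
  have hnil : PySem.List.min? ([] : List Int) (fun x => x) = none := by
    rw [PySem.List.min?_eq_none_iff]
  rcases hv : PySem.List.min? l (fun x => x) with _ | m
  · rw [PySem.List.min?_eq_none_iff] at hv
    subst hv
    simp [hnil]
  · rcases hv' : PySem.List.min? (l.map (fun x => x + 1)) (fun x => x) with _ | m'
    · rw [PySem.List.min?_eq_none_iff, List.map_eq_nil_iff] at hv'
      subst hv'
      rw [hnil] at hv
      cases hv
    · obtain ⟨y, hy, rfl⟩ := List.mem_map.mp (PySem.List.min?_mem hv')
      have hmin' : ∀ w ∈ l, y ≤ w := by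
        intro w hw
        have := PySem.List.min?_isMin hv' (w + 1) (List.mem_map.mpr ⟨w, hw, rfl⟩)
        omega
      have h1 : y ≤ m := hmin' m (PySem.List.min?_mem hv)
      have h2 : m ≤ y := PySem.List.min?_isMin hv y hy
      have : y = m := by omega
      rw [Option.map_some, this]

theorem pyGetD_cons_succ (x : String) (xs : List String) (i : Int) (h : 0 ≤ i) :
    PySem.List.pyGetD (x :: xs) (i + 1) "" = PySem.List.pyGetD xs i "" := by
  lift i to ℕ using h
  have : ((i : Int) + 1) = ((i + 1 : ℕ) : Int) := by push_cast; ring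
  rw [this, PySem.List.pyGetD_natCast, PySem.List.pyGetD_natCast, List.getD_cons_succ]

theorem bare_not_inline {t : String} (hb : (t == "-target" || t == "--target") = true) :
    (PySem.Str.startswith t "--target=" || PySem.Str.startswith t "-target=") = false := by
  rcases Bool.or_eq_true_iff.mp hb with h | h
  · have := beq_iff_eq.mp h; subst this; decide
  · have := beq_iff_eq.mp h; subst this; decide

theorem alt_eq_refScan (args : List String) :
    extract_target_triple_py_alt args = refScan args false := by
  induction args with
  | nil => rfl
  | cons t rest ih =>
    obtain ⟨hbr, hir⟩ := mem_alt_nonneg rest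
    by_cases hb : (t == "-target" || t == "--target") = true
    · -- t is a bare flag
      have hi := bare_not_inline hb
      have hI : alt_inline (t :: rest) = (alt_inline rest).map (fun x => x + 1) := by
        rw [alt_inline_cons, hi]
        simp
      rcases rest with _ | ⟨r, rs⟩
      · -- no follower: both searches come up empty
        have hA : alt_bare [t] = [] := by
          rw [alt_bare_cons]
          simp [alt_bare, alt_bare_aux]
        have hI' : alt_inline [t] = [] := by
          rw [hI]
          simp [alt_inline, alt_inline_aux]
        have hR : refScan [t] false = none := by
          rw [refScan, if_neg (by simp), if_pos hb, refScan_nil]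
        rw [hR]
        simp only [extract_target_triple_py_alt, hA, hI']
        simp
      · -- bare flag with follower: index 0 lands in bare, B returns args[1]
        have hA : alt_bare (t :: r :: rs) = (0 : Int) :: (alt_bare (r :: rs)).map (fun x => x + 1) := by
          rw [alt_bare_cons]
          simp [hb]
        have hR : refScan (t :: r :: rs) false = some r := by
          rw [refScan, if_neg (by simp), if_pos hb, refScan_cons_true]
        have hmin : PySem.List.min?
            (((0 : Int) :: (alt_bare (r :: rs)).map (fun x => x + 1)) ++
              (alt_inline (r :: rs)).map (fun x => x + 1)) (fun x => x) = some 0 := by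
          apply min?_zero
          · simp
          · intro y hy
            rcases List.mem_append.mp hy with h | h
            · rcases List.mem_cons.mp h with h | h
              · omega
              · obtain ⟨z, hz, rfl⟩ := List.mem_map.mp h
                have := hbr z hz; omega
            · obtain ⟨z, hz, rfl⟩ := List.mem_map.mp h
              have := hir z hz; omega
        rw [hR]
        simp only [extract_target_triple_py_alt, hA, hI, hmin, List.isEmpty_cons, Bool.false_and,
          Bool.false_eq_true, if_false, List.headD_cons, Bool.not_false, Bool.true_and]
        simp only [BEq.rfl, if_true]
        rw [pyGetD_cons_succ t (r :: rs) 0 le_rfl, PySem.List.pyGetD_zero_cons]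
    · -- t is not a bare flag
      by_cases hi : (PySem.Str.startswith t "--target=" || PySem.Str.startswith t "-target=") = true
      · -- inline at position 0: index 0 lands in inline
        have hA : alt_bare (t :: rest) = (alt_bare rest).map (fun x => x + 1) := by
          rw [alt_bare_cons]
          simp [hb]
        have hI : alt_inline (t :: rest) = (0 : Int) :: (alt_inline rest).map (fun x => x + 1) := by
          rw [alt_inline_cons, hi]
          simp
        have hR : refScan (t :: rest) false =
            some (((PySem.Str.splitMax? t "=" 1).getD []).getD 1 "") := by
          rw [refScan, if_neg (by simp), if_neg hb, if_pos hi]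
        have hmin : PySem.List.min?
            ((alt_bare rest).map (fun x => x + 1) ++
              ((0 : Int) :: (alt_inline rest).map (fun x => x + 1))) (fun x => x) = some 0 := by
          apply min?_zero
          · simp
          · intro y hy
            rcases List.mem_append.mp hy with h | h
            · obtain ⟨z, hz, rfl⟩ := List.mem_map.mp h
              have := hbr z hz; omega
            · rcases List.mem_cons.mp h with h | h
              · omega
              · obtain ⟨z, hz, rfl⟩ := List.mem_map.mp h
                have := hir z hz; omega
        have htest : (!((alt_bare rest).map (fun x => x + 1)).isEmpty &&
            ((alt_bare rest).map (fun x => x + 1)).headD 0 == (0 : Int)) = false := by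
          rcases hab : alt_bare rest with _ | ⟨h0, hs⟩
          · simp
          · have hh : 0 ≤ h0 := hbr h0 (by rw [hab]; exact List.mem_cons_self ..)
            simp only [List.map_cons, List.headD_cons, List.isEmpty_cons, Bool.not_false,
              Bool.true_and]
            rw [beq_eq_false_iff_ne]
            omega
        rw [hR]
        simp only [extract_target_triple_py_alt, hA, hI, hmin, htest, List.isEmpty_cons,
          Bool.and_false, Bool.false_eq_true, if_false, PySem.List.pyGetD_zero_cons]
      · -- neither form at position 0
        have hA : alt_bare (t :: rest) = (alt_bare rest).map (fun x => x + 1) := by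
          rw [alt_bare_cons]
          simp [hb]
        have hI : alt_inline (t :: rest) = (alt_inline rest).map (fun x => x + 1) := by
          rw [alt_inline_cons, eq_false_of_ne_true hi]
          simp
        have hR : refScan (t :: rest) false = refScan rest false := by
          rw [refScan, if_neg (by simp), if_neg hb, if_neg (by simpa using hi)]
        rw [hR, ← ih]
        simp only [extract_target_triple_py_alt, hA, hI, ← List.map_append, min?_shift,
          List.isEmpty_map]
        rcases hemp : ((alt_bare rest).isEmpty && (alt_inline rest).isEmpty) with _ | _
        · -- the searches are nonempty: min shifts by one
          simp only [Bool.false_eq_true, if_false]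
          rcases hv : PySem.List.min? (alt_bare rest ++ alt_inline rest) (fun x => x) with _ | m
          · simp
          · have hm0 : 0 ≤ m := by
              rcases List.mem_append.mp (PySem.List.min?_mem hv) with h | h
              · exact hbr m h
              · exact hir m h
            simp only [Option.map_some]
            have htest : (!(alt_bare rest).isEmpty &&
                ((alt_bare rest).map (fun x => x + 1)).headD 0 == m + 1) =
                (!(alt_bare rest).isEmpty && (alt_bare rest).headD 0 == m) := by
              rcases hab : alt_bare rest with _ | ⟨h0, hs⟩
              · simp
              · simp only [List.map_cons, List.headD_cons, List.isEmpty_cons, Bool.not_false,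
                  Bool.true_and]
                by_cases he : h0 = m
                · subst he; simp
                · rw [beq_eq_false_iff_ne.mpr (by omega : h0 + 1 ≠ m + 1),
                    beq_eq_false_iff_ne.mpr he]
            rw [htest]
            by_cases hc : (!(alt_bare rest).isEmpty && (alt_bare rest).headD 0 == m) = true
            · rw [if_pos hc, if_pos hc, pyGetD_cons_succ t rest (m + 1) (by omega)]
            · rw [if_neg hc, if_neg hc, pyGetD_cons_succ t rest m hm0]
        · -- both searches empty on rest, hence on t :: rest too
          simp

-- ===== VERDICT (by name: the statement is the Claim_ definition above) =====
theorem extract_target_triple_py_spec : Claim_equal_extract_target_triple_py := by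
  intro args _
  show extract_target_triple_py args = extract_target_triple_py_alt args
  rw [alt_eq_refScan]
  simpa [extract_target_triple_py] using loops_agree args 0
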